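-- pv_equiv track=rewrite | github.com/abunten/GeneFinder | gene_finder.py | rest_of_ORF
-- ===== SOURCE A (Python) =====
-- def rest_of_ORF(dna):
--     """ Takes a DNA sequence that is assumed to begin with a start
--         codon and returns the sequence up to but not including the
--         first in frame stop codon.  If there is no in frame stop codon,
--         returns the whole string.
--         dna: a DNA sequence
--         returns: the open reading frame represented as a string
--     >>> rest_of_ORF("ATGTGAA")
--     'ATG'
--     >>> rest_of_ORF("ATGAGATAGG")
--     'ATGAGA'
--     """
--     stop1 = 'TGA'
--     stop2 = 'TAG'
--     stop3 = 'TAA'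
--     y = 0
--     for y in range(0, len(dna), 3):
--         if dna[y: (y+3)] == stop1:
--             rest = dna[:y]
--             return rest
--         if dna[y: (y+3)] == stop2:
--             rest = dna[:y]
--             return rest
--         if dna[y: (y+3)] == stop3:
--             rest = dna[:y]
--             return rest
--     return dna
-- ===== SOURCE B (Python) =====
-- def rest_of_ORF(dna):
--     codons = [dna[i:i + 3] for i in range(0, len(dna), 3)]
--     kept = []
--     for codon in codons:
--         if codon in ('TGA', 'TAG', 'TAA'):
--             break
--         kept.append(codon)
--     return ''.join(kept)
-- ===== Notes on version B (the rewrite author's own statement) =====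
-- stated objective: idiomatic
-- what changed: B first chunks the string into a codon list, then joins the prefix of codons before the first stop codon, instead of A's index scan that early-returns a slice of the original string.
import Mathlib
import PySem

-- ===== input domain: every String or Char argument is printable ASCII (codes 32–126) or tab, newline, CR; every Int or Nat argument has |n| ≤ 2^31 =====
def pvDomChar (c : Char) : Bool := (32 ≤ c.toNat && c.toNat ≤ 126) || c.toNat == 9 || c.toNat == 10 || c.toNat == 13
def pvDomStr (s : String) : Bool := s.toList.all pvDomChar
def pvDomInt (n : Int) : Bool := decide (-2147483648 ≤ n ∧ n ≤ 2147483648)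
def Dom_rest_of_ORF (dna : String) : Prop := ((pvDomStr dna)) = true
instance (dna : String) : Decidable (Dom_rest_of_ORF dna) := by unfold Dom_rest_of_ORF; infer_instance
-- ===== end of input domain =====

-- B chunks the string into a codon list and joins the prefix before the first stop codon,
-- instead of A's index scan that early-returns a slice of the original string (idiomatic decomposition).

-- ===== PORT A =====
-- the 'for y in range(0, len(dna), 3)' loop with its three early returns
def restLoopA (dna : List Char) : List Int → List Char
  | [] => dna
  | y :: ys =>
    if PySem.List.slice dna (some y) (some (y + 3)) = ['T','G','A'] then
      PySem.List.slice dna none (some y)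
    else if PySem.List.slice dna (some y) (some (y + 3)) = ['T','A','G'] then
      PySem.List.slice dna none (some y)
    else if PySem.List.slice dna (some y) (some (y + 3)) = ['T','A','A'] then
      PySem.List.slice dna none (some y)
    else restLoopA dna ys

def rest_of_ORF (dna : String) : String :=
  String.ofList (restLoopA dna.toList (PySem.List.pyRange 0 (PySem.Chars.len dna.toList) 3))

-- ===== PORT B =====
-- the 'for codon in codons: if codon in (...): break; kept.append(codon)' consumer
def consumeB : List (List Char) → List (List Char)
  | [] => []
  | c :: cs =>
    if c = ['T','G','A'] ∨ c = ['T','A','G'] ∨ c = ['T','A','A'] then []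
    else c :: consumeB cs

def rest_of_ORF_alt (dna : String) : String :=
  let codons := (PySem.List.pyRange 0 (PySem.Chars.len dna.toList) 3).map
    (fun i => PySem.List.slice dna.toList (some i) (some (i + 3)))
  String.ofList (PySem.Chars.join [] (consumeB codons))

-- ===== PRECONDITION & SPEC =====
def Spec_rest_of_ORF (dna : String) (out : String) : Prop := out = rest_of_ORF_alt dna
instance (dna : String) (out : String) : Decidable (Spec_rest_of_ORF dna out) := by unfold Spec_rest_of_ORF; infer_instance

-- ===== CLAIM (what is proved, stated in full; the proofs are below) =====
def Claim_equal_rest_of_ORF : Prop := ∀ (dna : String), Dom_rest_of_ORF dna → Spec_rest_of_ORF dna (rest_of_ORF dna)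

-- ===== LEMMAS AND PROOFS =====

lemma join_nil_eq_flatten (ps : List (List Char)) : PySem.Chars.join [] ps = ps.flatten := by
  induction ps with
  | nil => rfl
  | cons c ps ih =>
    cases ps with
    | nil => simp [PySem.Chars.join, List.intercalate]
    | cons d qs =>
      simp only [PySem.Chars.join, List.intercalate, List.intersperse] at ih ⊢
      simp_all

lemma pyRange_three_cons (a b : Int) (h : a < b) :
    PySem.List.pyRange a b 3 = a :: PySem.List.pyRange (a + 3) b 3 := by
  rw [PySem.List.pyRange_of_pos _ _ (by norm_num), PySem.List.pyRange_of_pos _ _ (by norm_num)]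
  have hcount : (if a < b then ((b - a + 3 - 1) / 3).toNat else 0) =
      (if a + 3 < b then ((b - (a + 3) + 3 - 1) / 3).toNat else 0) + 1 := by
    rw [if_pos h]
    by_cases h3 : a + 3 < b
    · rw [if_pos h3]
      have hrw : b - a + 3 - 1 = (b - (a + 3) + 3 - 1) + 1 * 3 := by ring
      rw [hrw, Int.add_mul_ediv_right _ _ (by norm_num)]
      have hq : 0 ≤ (b - (a + 3) + 3 - 1) / 3 := Int.ediv_nonneg (by omega) (by norm_num)
      omega
    · rw [if_neg h3]
      have : b - a + 3 - 1 = 3 ∨ b - a + 3 - 1 = 4 ∨ b - a + 3 - 1 = 5 := by omega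
      rcases this with h' | h' | h' <;> rw [h'] <;> decide
  rw [hcount, List.range_succ_eq_map, List.map_cons, List.map_map]
  refine congrArg₂ List.cons (by simp) ?_
  exact List.map_congr_left (fun k _ => by simp [Nat.succ_eq_add_one]; ring)

lemma pyRange_three_nil (a b : Int) (h : b ≤ a) : PySem.List.pyRange a b 3 = [] := by
  rw [PySem.List.pyRange_of_pos _ _ (by norm_num), if_neg (not_lt.2 h)]
  simp

lemma slice_three (cs : List Char) (y : Nat) :
    PySem.List.slice cs (some (y : Int)) (some ((y : Int) + 3)) = (cs.drop y).take 3 := by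
  have h3 : ((y : Int) + 3) = ((y + 3 : Nat) : Int) := by push_cast; ring
  rw [h3, PySem.List.slice_natCast]
  congr 1
  omega

lemma main_invariant (cs : List Char) (k : Nat) : ∀ y : Nat, cs.length - y ≤ k →
    restLoopA cs (PySem.List.pyRange (y : Int) (cs.length : Int) 3) =
      cs.take y ++ PySem.Chars.join []
        (consumeB ((PySem.List.pyRange (y : Int) (cs.length : Int) 3).map
          (fun i => PySem.List.slice cs (some i) (some (i + 3))))) := by
  induction k with
  | zero =>
    intro y hy
    have hge : (cs.length : Int) ≤ (y : Int) := by exact_mod_cast Nat.le_of_sub_eq_zero (Nat.le_zero.mp hy)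
    rw [pyRange_three_nil _ _ hge]
    simp [restLoopA, consumeB, PySem.Chars.join, List.intercalate,
      List.take_of_length_le (by omega : cs.length ≤ y)]
  | succ k ih =>
    intro y hy
    by_cases hlt : y < cs.length
    · rw [pyRange_three_cons _ _ (by exact_mod_cast hlt)]
      have hcast : ((y : Int) + 3) = ((y + 3 : Nat) : Int) := by push_cast; ring
      rw [List.map_cons]
      by_cases hstop : PySem.List.slice cs (some (y : Int)) (some ((y : Int) + 3)) = ['T','G','A'] ∨
          PySem.List.slice cs (some (y : Int)) (some ((y : Int) + 3)) = ['T','A','G'] ∨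
          PySem.List.slice cs (some (y : Int)) (some ((y : Int) + 3)) = ['T','A','A']
      · have hA : restLoopA cs ((y : Int) :: PySem.List.pyRange ((y : Int) + 3) (cs.length : Int) 3) =
            PySem.List.slice cs none (some (y : Int)) := by
          rcases hstop with h | h | h <;> simp [restLoopA, h]
        have hB : consumeB ((PySem.List.slice cs (some (y : Int)) (some ((y : Int) + 3))) ::
            (PySem.List.pyRange ((y : Int) + 3) (cs.length : Int) 3).map
              (fun i => PySem.List.slice cs (some i) (some (i + 3)))) = [] := by
          simp [consumeB, hstop]
        rw [hA, hB, PySem.List.slice_to_natCast]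
        simp [PySem.Chars.join, List.intercalate]
      · push Not at hstop
        obtain ⟨h1, h2, h3⟩ := hstop
        have hA : restLoopA cs ((y : Int) :: PySem.List.pyRange ((y : Int) + 3) (cs.length : Int) 3) =
            restLoopA cs (PySem.List.pyRange ((y : Int) + 3) (cs.length : Int) 3) := by
          simp [restLoopA, h1, h2, h3]
        have hB : consumeB ((PySem.List.slice cs (some (y : Int)) (some ((y : Int) + 3))) ::
            (PySem.List.pyRange ((y : Int) + 3) (cs.length : Int) 3).map
              (fun i => PySem.List.slice cs (some i) (some (i + 3)))) =
            (PySem.List.slice cs (some (y : Int)) (some ((y : Int) + 3))) ::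
              consumeB ((PySem.List.pyRange ((y : Int) + 3) (cs.length : Int) 3).map
                (fun i => PySem.List.slice cs (some i) (some (i + 3)))) := by
          simp only [consumeB]
          rw [if_neg (by tauto)]
        rw [hA, hB, hcast, ih (y + 3) (by omega)]
        rw [join_nil_eq_flatten, join_nil_eq_flatten, List.flatten_cons]
        rw [← hcast, slice_three]
        rw [show y + 3 = y + 3 from rfl, List.take_add (i := y) (j := 3)]
        simp [List.append_assoc]
    · have hge : (cs.length : Int) ≤ (y : Int) := by exact_mod_cast Nat.le_of_not_lt hlt
      rw [pyRange_three_nil _ _ hge]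
      simp [restLoopA, consumeB, PySem.Chars.join, List.intercalate,
        List.take_of_length_le (by omega : cs.length ≤ y)]

-- ===== VERDICT (by name: the statement is the Claim_ definition above) =====
theorem rest_of_ORF_spec : Claim_equal_rest_of_ORF := by
  intro dna _
  unfold Spec_rest_of_ORF rest_of_ORF rest_of_ORF_alt
  have h := main_invariant dna.toList dna.toList.length 0 (by omega)
  simp only [Nat.cast_zero] at h
  simp only [PySem.Chars.len_eq]
  rw [h]
  simp
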